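-- pv_equiv track=rewrite | github.com/Mimo53/ENSAI_Indexation_Web_TPs | TP3/src/filtering.py | filter_all_tokens
-- ===== SOURCE A (Python) =====
-- def filter_all_tokens(tokens, indexes):
--     """All tokens must be present"""
--     docs = None
--
--     for token in tokens:
--         token_docs = set()
--         for index in indexes:
--             if token in index:
--                 token_docs.update(index[token])
--
--         if not token_docs:
--             return set()
--
--         docs = token_docs if docs is None else docs & token_docs
--
--     return docs or set()
-- ===== SOURCE B (Python) =====
-- def filter_all_tokens(tokens, indexes):
--     """All tokens must be present"""
--     merged = {}
--     for index in indexes: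
--         for token, doc_ids in index.items():
--             merged.setdefault(token, set()).update(doc_ids)
--
--     if not tokens:
--         return set()
--     first = merged.get(tokens[0], set())
--     rest = tokens[1:]
--     return {d for d in first if all(d in merged.get(t, set()) for t in rest)}
-- ===== Notes on version B (the rewrite author's own statement) =====
-- stated objective: alternative
-- what changed: B first merges all indexes into one combined inverted index (token -> union of posting sets), then, instead of A's fold of pairwise intersections with a None accumulator and early returns, keeps the first token's posting set and filters it by an all-tokens membership test in a set comprehension.
import Mathlib
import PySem

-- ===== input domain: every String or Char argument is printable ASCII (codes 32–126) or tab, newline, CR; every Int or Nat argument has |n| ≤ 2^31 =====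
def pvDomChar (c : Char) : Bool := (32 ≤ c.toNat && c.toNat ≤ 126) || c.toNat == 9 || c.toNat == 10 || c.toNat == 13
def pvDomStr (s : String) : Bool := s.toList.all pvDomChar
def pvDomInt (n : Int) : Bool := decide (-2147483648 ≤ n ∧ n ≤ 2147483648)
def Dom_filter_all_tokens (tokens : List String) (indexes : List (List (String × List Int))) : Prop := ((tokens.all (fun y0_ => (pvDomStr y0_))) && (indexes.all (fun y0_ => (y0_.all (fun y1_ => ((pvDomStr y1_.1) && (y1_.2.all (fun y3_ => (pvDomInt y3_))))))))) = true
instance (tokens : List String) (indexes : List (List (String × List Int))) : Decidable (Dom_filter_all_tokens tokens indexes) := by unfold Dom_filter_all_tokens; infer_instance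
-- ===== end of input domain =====

-- B merges all indexes into one combined inverted index, then filters the first token's
-- posting set by an all-tokens membership test; same return value as A (alternative, not faster).

-- ===== PORT A =====
-- union over the indexes of index[token] (the inner 'for index in indexes' loop of A)
def pvAUnion (token : String) (indexes : List (List (String × List Int))) : PySem.Set Int :=
  indexes.foldl (fun td index =>
    match (PySem.Dict.mk index).get? token with
    | some v => PySem.Set.update td v
    | none => td) PySem.Set.empty

-- the outer 'for token in tokens' loop of A, with docs : Option (set)  (None-start)
def pvALoop (tokens : List String) (indexes : List (List (String × List Int)))
    (docs : Option (PySem.Set Int)) : List Int :=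
  match tokens with
  | [] => match docs with | none => [] | some s => s   -- 'docs or set()' ([] and s=[] coincide)
  | t :: rest =>
    let token_docs := pvAUnion t indexes
    if token_docs = [] then []
    else pvALoop rest indexes
      (some (match docs with | none => token_docs | some d => PySem.Set.inter d token_docs))

def filter_all_tokens (tokens : List String) (indexes : List (List (String × List Int))) : List Int :=
  pvALoop tokens indexes none

-- ===== PORT B =====
-- first pass: merged inverted index (merged.setdefault(token, set()).update(doc_ids))
def pvMerge (indexes : List (List (String × List Int))) : PySem.Dict String (PySem.Set Int) :=
  indexes.foldl (fun m index =>
    index.foldl (fun m p => m.modify p.1 PySem.Set.empty (fun s => PySem.Set.update s p.2)) m)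
    PySem.Dict.empty

def filter_all_tokens_alt (tokens : List String) (indexes : List (List (String × List Int))) : List Int :=
  let merged := pvMerge indexes
  match tokens with
  | [] => []
  | t0 :: rest =>
    -- {d for d in first if all(d in merged.get(t, set()) for t in rest)}
    (merged.getD t0 PySem.Set.empty).filter
      (fun d => rest.all (fun t => (merged.getD t PySem.Set.empty).contains d))

-- ===== PRECONDITION & SPEC =====
-- Pre_ excludes association lists with duplicate keys inside one index: a Python dict cannot
-- have duplicate keys, so such lists represent no Python input (A reads only the first match,
-- B folds over all items, and neither behaviour is specified for them).
def Pre_filter_all_tokens (tokens : List String) (indexes : List (List (String × List Int))) : Prop :=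
  ∀ index ∈ indexes, (index.map Prod.fst).Nodup
instance (tokens : List String) (indexes : List (List (String × List Int))) : Decidable (Pre_filter_all_tokens tokens indexes) := by unfold Pre_filter_all_tokens; infer_instance
def pvWitness_filter_all_tokens : List String × (List (List (String × List Int))) :=
  (["a", "b"], [[("a", [1, 2]), ("b", [2])], [("b", [2, 3])]])

def Spec_filter_all_tokens (tokens : List String) (indexes : List (List (String × List Int))) (out : List Int) : Prop := out = filter_all_tokens_alt tokens indexes
instance (tokens : List String) (indexes : List (List (String × List Int))) (out : List Int) : Decidable (Spec_filter_all_tokens tokens indexes out) := by unfold Spec_filter_all_tokens; infer_instance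

-- ===== CLAIM =====
def Claim_equal_filter_all_tokens : Prop := ∀ (tokens : List String) (indexes : List (List (String × List Int))), Dom_filter_all_tokens tokens indexes → Pre_filter_all_tokens tokens indexes → Spec_filter_all_tokens tokens indexes (filter_all_tokens tokens indexes)

-- ===== LEMMAS AND PROOFS =====

-- one index merged into m: the entry at t gets index[t] unioned in (nodup keys)
theorem pv_merge_one (l : List (String × List Int)) (m : PySem.Dict String (PySem.Set Int))
    (t : String) (h : (l.map Prod.fst).Nodup) :
    (l.foldl (fun m p => m.modify p.1 PySem.Set.empty (fun s => PySem.Set.update s p.2)) m).getD t PySem.Set.empty =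
    (match (PySem.Dict.mk l).get? t with
     | some v => PySem.Set.update (m.getD t PySem.Set.empty) v
     | none => m.getD t PySem.Set.empty) := by
  induction l generalizing m with
  | nil => simp [PySem.Dict.get?]
  | cons p rest ih =>
    obtain ⟨k, v⟩ := p
    simp only [List.map_cons, List.nodup_cons] at h
    simp only [List.foldl_cons]
    rw [ih _ h.2, PySem.Dict.get?_mk_cons]
    by_cases hkt : k = t
    · subst hkt
      have hnone : (PySem.Dict.mk rest).get? k = none := by
        rw [PySem.Dict.get?_eq_none_iff_not_mem_keys]
        simpa [PySem.Dict.keys] using h.1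
      simp [hnone, PySem.Dict.getD_modify_self]
    · have hbeq : (k == t) = false := by simp [hkt]
      rw [PySem.Dict.getD_modify_of_ne m PySem.Set.empty _ (Ne.symm hkt)]
      simp [hbeq]

-- the whole merge, read at t, is A's per-token union (generalized start)
theorem pv_merge_getD (indexes : List (List (String × List Int)))
    (m : PySem.Dict String (PySem.Set Int)) (t : String)
    (h : ∀ index ∈ indexes, (index.map Prod.fst).Nodup) :
    (indexes.foldl (fun m index =>
        index.foldl (fun m p => m.modify p.1 PySem.Set.empty (fun s => PySem.Set.update s p.2)) m) m).getD t PySem.Set.empty =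
    indexes.foldl (fun td index =>
      match (PySem.Dict.mk index).get? t with
      | some v => PySem.Set.update td v
      | none => td) (m.getD t PySem.Set.empty) := by
  induction indexes generalizing m with
  | nil => rfl
  | cons index rest ih =>
    simp only [List.foldl_cons]
    rw [ih _ (fun i hi => h i (List.mem_cons_of_mem _ hi)),
        pv_merge_one index m t (h index (List.mem_cons_self ..))]

theorem pv_merge_eq_union (indexes : List (List (String × List Int))) (t : String)
    (h : ∀ index ∈ indexes, (index.map Prod.fst).Nodup) :
    (pvMerge indexes).getD t PySem.Set.empty = pvAUnion t indexes := by
  unfold pvMerge pvAUnion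
  rw [pv_merge_getD indexes PySem.Dict.empty t h]
  rfl

-- A's fold of intersections with a started accumulator is a single filter by membership
theorem pvALoop_some (indexes : List (List (String × List Int))) (rest : List String)
    (s : PySem.Set Int) :
    pvALoop rest indexes (some s) =
    s.filter (fun d => rest.all (fun t => (pvAUnion t indexes).contains d)) := by
  induction rest generalizing s with
  | nil => simp [pvALoop]
  | cons t rest ih =>
    simp only [pvALoop]
    by_cases hte : pvAUnion t indexes = []
    · rw [if_pos hte]
      symm
      rw [List.filter_eq_nil_iff]
      intro d _
      simp [hte]
    · simp only [if_neg hte, ih, PySem.Set.inter, List.filter_filter, List.all_cons,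
        Bool.and_comm]

-- ===== VERDICT =====
theorem filter_all_tokens_spec : Claim_equal_filter_all_tokens := by
  intro tokens indexes _ hpre
  unfold Spec_filter_all_tokens filter_all_tokens filter_all_tokens_alt
  match tokens with
  | [] => rfl
  | t0 :: rest =>
    simp only [pvALoop, pv_merge_eq_union indexes _ hpre]
    by_cases h0 : pvAUnion t0 indexes = []
    · simp [h0]
    · rw [if_neg h0, pvALoop_some]
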